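-- pv_equiv track=rewrite | github.com/Sandeep-kumaresan/Leetcode | samp2.py | max_length_subsequence
-- ===== SOURCE A (Python) =====
-- def max_length_subsequence(arr, k):
--     n = len(arr)
--     dp = [1] * n
--
--     for i in range(1, n):
--         for j in range(i):
--             if (arr[i] - arr[j]) % k == 0:
--                 dp[i] = max(dp[i], dp[j] + 1)
--
--     return max(dp)
-- ===== SOURCE B (Python) =====
-- def max_length_subsequence(arr, k):
--     counts = {}
--     for x in arr:
--         r = x % k
--         counts[r] = counts.get(r, 0) + 1
--     return max(counts.values())
-- ===== Notes on version B (the rewrite author's own statement) =====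
-- stated objective: faster
-- what changed: Replaces the O(n^2) longest-chain DP with a single counting pass: elements chain iff they share a residue mod k, so the answer is the largest residue-class count.
-- outside the precondition, e.g. on max_length_subsequence([5], 0): A returns 1, B raises ZeroDivisionError
import Mathlib
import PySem

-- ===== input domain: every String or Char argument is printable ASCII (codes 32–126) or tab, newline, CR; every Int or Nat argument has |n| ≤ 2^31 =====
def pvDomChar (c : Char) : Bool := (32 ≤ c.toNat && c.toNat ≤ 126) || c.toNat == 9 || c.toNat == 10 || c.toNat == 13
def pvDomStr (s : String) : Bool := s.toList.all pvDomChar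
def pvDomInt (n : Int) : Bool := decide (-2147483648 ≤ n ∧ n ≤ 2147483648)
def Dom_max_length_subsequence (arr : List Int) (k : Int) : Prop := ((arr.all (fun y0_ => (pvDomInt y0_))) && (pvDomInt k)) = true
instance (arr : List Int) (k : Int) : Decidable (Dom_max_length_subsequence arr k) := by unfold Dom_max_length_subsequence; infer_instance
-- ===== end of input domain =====

-- B replaces A's O(n^2) longest-chain DP by a single counting pass over residues mod k
-- (elements chain iff they share a residue), returning the largest residue-class count.

-- ===== PORT A =====
def max_length_subsequence (arr : List Int) (k : Int) : Int :=
  let n : Int := (arr.length : Int)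
  let dp0 : List Int := List.replicate arr.length 1
  let dp :=
    (PySem.List.pyRange 1 n).foldl (fun dp i =>
      (PySem.List.pyRange 0 i).foldl (fun dp j =>
        if PySem.Int.mod (PySem.List.pyGetD arr i 0 - PySem.List.pyGetD arr j 0) k = 0 then
          dp.set i.toNat (max (PySem.List.pyGetD dp i 0) (PySem.List.pyGetD dp j 0 + 1))
        else dp) dp) dp0
  -- max(dp): Python raises ValueError on an empty list; Pre_ excludes arr = []
  (PySem.List.max? dp (fun v => v)).getD 0

-- ===== PORT B =====
def max_length_subsequence_alt (arr : List Int) (k : Int) : Int :=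
  let counts := arr.foldl (fun d x =>
    d.insert (PySem.Int.mod x k) (d.getD (PySem.Int.mod x k) 0 + 1))
    (PySem.Dict.empty : PySem.Dict Int Int)
  -- max(counts.values()): Python raises ValueError on an empty dict; Pre_ excludes arr = []
  (PySem.List.max? counts.values (fun v => v)).getD 0

-- ===== PRECONDITION & SPEC =====
-- Pre_ excludes arr = [] (max() of an empty sequence raises ValueError in both programs) and k = 0
-- (ZeroDivisionError: B raises on every such input, A on every one with len(arr) ≥ 2 — A accidentally
-- returns 1 on a singleton list with k = 0 because its loops never execute, while B raises there).
def Pre_max_length_subsequence (arr : List Int) (k : Int) : Prop := arr ≠ [] ∧ k ≠ 0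
instance (arr : List Int) (k : Int) : Decidable (Pre_max_length_subsequence arr k) := by
  unfold Pre_max_length_subsequence; infer_instance

def pvWitness_max_length_subsequence : List Int × Int := ([1, 3, 2, 5], 2)

def Spec_max_length_subsequence (arr : List Int) (k : Int) (out : Int) : Prop := out = max_length_subsequence_alt arr k
instance (arr : List Int) (k : Int) (out : Int) : Decidable (Spec_max_length_subsequence arr k out) := by unfold Spec_max_length_subsequence; infer_instance

-- ===== CLAIM (what is proved, stated in full; the proofs are below) =====
def Claim_equal_max_length_subsequence : Prop := ∀ (arr : List Int) (k : Int), Dom_max_length_subsequence arr k → Pre_max_length_subsequence arr k → Spec_max_length_subsequence arr k (max_length_subsequence arr k)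

-- ===== LEMMAS AND PROOFS =====

-- residue of x mod k
def pvRes (k x : Int) : Int := PySem.Int.mod x k
def pvPred (k ρ : Int) (y : Int) : Bool := PySem.Int.mod y k == ρ
def pvF (arr : List Int) (k : Int) (t : Nat) : Int :=
  ((arr.take (t + 1)).countP (pvPred k (pvRes k (arr.getD t 0))) : Int)
def pvDp (arr : List Int) (k : Int) (m : Nat) : List Int :=
  (List.range arr.length).map (fun t => if t < m then pvF arr k t else 1)
def pvCnt (arr : List Int) (k ρ : Int) (m : Nat) : Int :=
  ((arr.take m).countP (pvPred k ρ) : Int)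

theorem pv_cnt_succ (arr : List Int) (k ρ : Int) (m : Nat) (hm : m < arr.length) :
    pvCnt arr k ρ (m + 1) = pvCnt arr k ρ m + (if pvPred k ρ (arr.getD m 0) then 1 else 0) := by
  unfold pvCnt
  rw [List.take_add_one, List.getElem?_eq_getElem hm, List.countP_append]
  rw [List.getD_eq_getElem arr 0 hm]
  simp [List.countP_cons]

theorem pv_f_eq_cnt (arr : List Int) (k ρ : Int) (m : Nat)
    (hres : pvRes k (arr.getD m 0) = ρ) : pvF arr k m = pvCnt arr k ρ (m + 1) := by
  unfold pvF pvCnt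
  rw [hres]

theorem pv_mod_eq_iff_dvd (k a b : Int) (hk : k ≠ 0) :
    PySem.Int.mod a k = PySem.Int.mod b k ↔ k ∣ (a - b) := by
  constructor
  · intro h
    have ha := PySem.Int.floordiv_mul_add_mod a k
    have hb := PySem.Int.floordiv_mul_add_mod b k
    exact ⟨PySem.Int.floordiv a k - PySem.Int.floordiv b k, by linarith [h]⟩
  · intro ⟨c, hc⟩
    have ha := PySem.Int.floordiv_mul_add_mod a k
    have hb := PySem.Int.floordiv_mul_add_mod b k
    have hdvd : k ∣ (PySem.Int.mod a k - PySem.Int.mod b k) :=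
      ⟨c - PySem.Int.floordiv a k + PySem.Int.floordiv b k, by linarith⟩
    have habs : |PySem.Int.mod a k - PySem.Int.mod b k| < |k| := by
      rcases lt_or_gt_of_ne hk with hneg | hpos
      · have b1 := PySem.Int.mod_neg_bounds a hneg
        have b2 := PySem.Int.mod_neg_bounds b hneg
        rw [abs_lt, abs_of_neg hneg]; omega
      · have b1 := PySem.Int.mod_nonneg a hpos
        have b2 := PySem.Int.mod_lt a hpos
        have b3 := PySem.Int.mod_nonneg b hpos
        have b4 := PySem.Int.mod_lt b hpos
        rw [abs_lt, abs_of_pos hpos]; omega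
    have h0 := Int.eq_zero_of_abs_lt_dvd ((abs_dvd k _).mpr hdvd) habs
    linarith

theorem pv_map_range_set {β : Type} (n t : Nat) (g : Nat → β) (v : β) :
    ((List.range n).map g).set t v = (List.range n).map (fun s => if s = t then v else g s) := by
  apply List.ext_getElem
  · simp
  · intro i h1 h2
    simp only [List.getElem_set, List.getElem_map, List.getElem_range]
    split_ifs with h3 h4 h4
    · rfl
    · exact absurd h3.symm h4
    · exact absurd h4.symm h3
    · rfl

theorem pv_inner_aux (arr : List Int) (k : Int) (hk : k ≠ 0) (i : Nat)
    (hi : i < arr.length) (m : Nat) (hm : m ≤ i) :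
    (PySem.List.pyRange 0 (m : Int)).foldl (fun dp j =>
        if PySem.Int.mod (PySem.List.pyGetD arr (i : Int) 0 - PySem.List.pyGetD arr j 0) k = 0 then
          dp.set (i : Int).toNat (max (PySem.List.pyGetD dp (i : Int) 0) (PySem.List.pyGetD dp j 0 + 1))
        else dp) (pvDp arr k i) =
    (List.range arr.length).map (fun t =>
      if t = i then 1 + pvCnt arr k (pvRes k (arr.getD i 0)) m
      else if t < i then pvF arr k t else 1) := by
  induction m with
  | zero =>
    show (PySem.List.pyRange 0 0).foldl _ _ = _
    rw [show PySem.List.pyRange 0 0 = [] from rfl]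
    unfold pvDp pvCnt
    simp only [List.foldl_nil, List.take_zero, List.countP_nil]
    apply List.map_congr_left
    intro t ht
    by_cases h : t = i
    · subst h; simp
    · simp [h]
  | succ m ih =>
    have hm' : m ≤ i := Nat.le_of_succ_le hm
    have hrange : PySem.List.pyRange 0 ((m + 1 : Nat) : Int) =
        PySem.List.pyRange 0 (m : Int) ++ [(m : Int)] := by
      push_cast
      exact PySem.List.pyRange_one_succ_right (by positivity)
    rw [hrange, List.foldl_append, ih hm']
    simp only [List.foldl_cons, List.foldl_nil]
    have hmn : m < arr.length := by omega
    have hmi : m < i := by omega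
    have e1 : PySem.List.pyGetD arr ((i:Nat) : Int) 0 = arr.getD i 0 := PySem.List.pyGetD_natCast arr i 0
    have e2 : PySem.List.pyGetD arr ((m:Nat) : Int) 0 = arr.getD m 0 := PySem.List.pyGetD_natCast arr m 0
    rw [e1, e2]
    have hcond : (PySem.Int.mod (arr.getD i 0 - arr.getD m 0) k = 0) ↔
        (pvRes k (arr.getD m 0) = pvRes k (arr.getD i 0)) := by
      rw [PySem.Int.mod_eq_zero_iff_dvd]
      rw [← pv_mod_eq_iff_dvd k _ _ hk]
      unfold pvRes
      exact comm
    by_cases hres : pvRes k (arr.getD m 0) = pvRes k (arr.getD i 0)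
    · rw [if_pos (hcond.mpr hres)]
      -- reads and the write
      have r1 : PySem.List.pyGetD ((List.range arr.length).map (fun t =>
          if t = i then 1 + pvCnt arr k (pvRes k (arr.getD i 0)) m
          else if t < i then pvF arr k t else 1)) ((i:Nat) : Int) 0
          = 1 + pvCnt arr k (pvRes k (arr.getD i 0)) m := by
        rw [PySem.List.pyGetD_natCast, PySem.List.getD_map_range _ _ _ _ hi]
        simp
      have r2 : PySem.List.pyGetD ((List.range arr.length).map (fun t =>
          if t = i then 1 + pvCnt arr k (pvRes k (arr.getD i 0)) m
          else if t < i then pvF arr k t else 1)) ((m:Nat) : Int) 0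
          = pvF arr k m := by
        rw [PySem.List.pyGetD_natCast, PySem.List.getD_map_range _ _ _ _ hmn]
        simp [hmi.ne, hmi]
      rw [r1, r2]
      have htoNat : ((i:Nat) : Int).toNat = i := by simp
      rw [htoNat, pv_map_range_set]
      apply List.map_congr_left
      intro s hs
      simp only [List.mem_range] at hs
      by_cases h : s = i
      · subst s
        simp only [if_pos]
        have hf : pvF arr k m = pvCnt arr k (pvRes k (arr.getD i 0)) m + 1 := by
          rw [pv_f_eq_cnt arr k _ m hres, pv_cnt_succ arr k _ m hmn]
          have : pvPred k (pvRes k (arr.getD i 0)) (arr.getD m 0) = true := by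
            unfold pvPred
            rw [beq_iff_eq]; exact hres
          rw [this]; simp
        rw [hf]
        rw [pv_cnt_succ arr k _ m hmn]
        have : pvPred k (pvRes k (arr.getD i 0)) (arr.getD m 0) = true := by
          unfold pvPred; rw [beq_iff_eq]; exact hres
        rw [this]
        simp only [if_pos]
        omega
      · simp [h]
    · rw [if_neg (fun hc => hres (hcond.mp hc))]
      apply List.map_congr_left
      intro s hs
      by_cases h : s = i
      · subst s
        simp only [if_pos]
        rw [pv_cnt_succ arr k _ m hmn]
        have : pvPred k (pvRes k (arr.getD i 0)) (arr.getD m 0) = false := by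
          unfold pvPred
          simp only [beq_eq_false_iff_ne, ne_eq]
          exact fun hc => hres hc
        rw [this]
        simp
      · simp [h]

theorem pv_inner (arr : List Int) (k : Int) (hk : k ≠ 0) (i : Nat)
    (hi : i < arr.length) :
    (PySem.List.pyRange 0 (i : Int)).foldl (fun dp j =>
        if PySem.Int.mod (PySem.List.pyGetD arr (i : Int) 0 - PySem.List.pyGetD arr j 0) k = 0 then
          dp.set (i : Int).toNat (max (PySem.List.pyGetD dp (i : Int) 0) (PySem.List.pyGetD dp j 0 + 1))
        else dp) (pvDp arr k i) = pvDp arr k (i + 1) := by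
  rw [pv_inner_aux arr k hk i hi i le_rfl]
  unfold pvDp
  apply List.map_congr_left
  intro s hs
  simp only [List.mem_range] at hs
  by_cases h : s = i
  · subst s
    have hf : pvF arr k i = pvCnt arr k (pvRes k (arr.getD i 0)) i + 1 := by
      rw [pv_f_eq_cnt arr k _ i rfl, pv_cnt_succ arr k _ i hi]
      have : pvPred k (pvRes k (arr.getD i 0)) (arr.getD i 0) = true := by
        unfold pvPred; rw [beq_iff_eq]; rfl
      rw [this]; simp
    simp only [if_pos, Nat.lt_succ_self]
    omega
  · have h2 : (s < i + 1) ↔ (s < i) := by omega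
    simp [h, h2]

theorem pv_outer (arr : List Int) (k : Int) (hk : k ≠ 0) (m : Nat)
    (h1 : 1 ≤ m) (hm : m ≤ arr.length) :
    (PySem.List.pyRange 1 (m : Int)).foldl (fun dp i =>
      (PySem.List.pyRange 0 i).foldl (fun dp j =>
        if PySem.Int.mod (PySem.List.pyGetD arr i 0 - PySem.List.pyGetD arr j 0) k = 0 then
          dp.set i.toNat (max (PySem.List.pyGetD dp i 0) (PySem.List.pyGetD dp j 0 + 1))
        else dp) dp) (List.replicate arr.length 1) = pvDp arr k m := by
  induction m with
  | zero => omega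
  | succ m ih =>
    by_cases hm1 : 1 ≤ m
    · have hrange : PySem.List.pyRange 1 ((m + 1 : Nat) : Int) =
          PySem.List.pyRange 1 (m : Int) ++ [(m : Int)] := by
        push_cast
        exact PySem.List.pyRange_one_succ_right (by exact_mod_cast hm1)
      rw [hrange, List.foldl_append, ih hm1 (by omega)]
      simp only [List.foldl_cons, List.foldl_nil]
      exact pv_inner arr k hk m (by omega)
    · have hm0 : m = 0 := by omega
      subst hm0
      have hrange : PySem.List.pyRange 1 ((1 : Nat) : Int) = [] := by decide
      rw [hrange]
      simp only [List.foldl_nil]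
      unfold pvDp
      apply List.ext_getElem
      · simp
      · intro t h1' h2'
        simp only [List.length_replicate] at h1'
        simp only [List.getElem_replicate, List.getElem_map, List.getElem_range]
        by_cases h : t < 1
        · have ht0 : t = 0 := by omega
          subst ht0
          simp only [if_pos h]
          unfold pvF pvPred pvRes
          rw [List.take_add_one, List.take_zero, List.getElem?_eq_getElem h1']
          rw [show ([] ++ (some arr[0]).toList) = [arr[0]] from rfl]
          rw [List.getD_eq_getElem arr 0 h1']
          simp
        · simp [h]

theorem pv_count_map (l : List Int) (f : Int → Int) (a : Int) :
    (l.map f).count a = l.countP (fun x => f x == a) := by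
  simp [List.count, List.countP_map, Function.comp_def]

theorem pv_f_le (arr : List Int) (k : Int) (t : Nat) :
    pvF arr k t ≤ ((arr.map (pvRes k)).count (pvRes k (arr.getD t 0)) : Int) := by
  rw [pv_count_map]
  unfold pvF
  have h := List.Sublist.countP_le (p := pvPred k (pvRes k (arr.getD t 0))) (List.take_sublist (t+1) arr)
  have he : (fun x => pvRes k x == pvRes k (arr.getD t 0)) = pvPred k (pvRes k (arr.getD t 0)) := rfl
  rw [he]
  exact_mod_cast h

theorem pv_f_attains (arr : List Int) (k : Int) :
    ∀ ρ ∈ arr.map (pvRes k), ∃ t < arr.length,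
      pvRes k (arr.getD t 0) = ρ ∧ pvF arr k t = ((arr.map (pvRes k)).count ρ : Int) := by
  induction arr using List.reverseRecOn with
  | nil => intro ρ h; simp at h
  | append_singleton l b ihl =>
    intro ρ hρ
    by_cases hb : pvRes k b = ρ
    · refine ⟨l.length, by simp, ?_, ?_⟩
      · rw [List.getD_eq_getElem _ 0 (by simp)]
        rw [List.getElem_concat_length rfl]
        exact hb
      · unfold pvF
        rw [List.getD_eq_getElem _ 0 (by simp), List.getElem_concat_length rfl]
        rw [List.take_of_length_le (by simp)]
        rw [pv_count_map, hb]
        rfl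
    · have hρl : ρ ∈ l.map (pvRes k) := by
        rw [List.map_append] at hρ
        rcases List.mem_append.mp hρ with h | h
        · exact h
        · simp at h; exact absurd h.symm hb
      obtain ⟨t, htl, hres, hcount⟩ := ihl ρ hρl
      refine ⟨t, by simp; omega, ?_, ?_⟩
      · rw [List.getD_eq_getElem _ 0 (by simp; omega), List.getElem_append_left htl]
        rw [List.getD_eq_getElem _ 0 htl] at hres
        exact hres
      · unfold pvF
        rw [List.getD_eq_getElem _ 0 (by simp; omega), List.getElem_append_left htl]
        rw [List.take_append_of_le_length (by omega)]
        have hc2 : ((l ++ [b]).map (pvRes k)).count ρ = (l.map (pvRes k)).count ρ := by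
          rw [List.map_append, List.count_append]
          simp [hb]
        rw [hc2]
        unfold pvF at hcount
        rw [List.getD_eq_getElem _ 0 htl] at hcount
        exact hcount

theorem pv_dp_final (arr : List Int) (k : Int) :
    pvDp arr k arr.length = (List.range arr.length).map (pvF arr k) := by
  unfold pvDp
  apply List.map_congr_left
  intro t hmem
  simp only [List.mem_range] at hmem
  simp [hmem]

theorem pv_max_eq (arr : List Int) (k : Int) (hne : arr ≠ []) :
    ((PySem.List.max? ((List.range arr.length).map (pvF arr k)) (fun v => v)).getD 0 : Int) =
    (PySem.List.max? ((PySem.Set.ofList (arr.map (pvRes k))).map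
        (fun ρ => ((arr.map (pvRes k)).count ρ : Int))) (fun v => v)).getD 0 := by
  have hn : 0 < arr.length := List.length_pos_iff.mpr hne
  set rs := arr.map (pvRes k) with hrs
  set L1 := (List.range arr.length).map (pvF arr k) with hL1
  set L2 := (PySem.Set.ofList rs).map (fun ρ => ((rs.count ρ) : Int)) with hL2
  have hL1ne : L1 ≠ [] := by
    simp [hL1, List.map_eq_nil_iff, List.range_eq_nil]
    omega
  have hL2ne : L2 ≠ [] := by
    have : rs.head (by simp [hrs, hne]) ∈ PySem.Set.ofList rs :=
      (PySem.Set.mem_ofList rs _).mpr (List.head_mem _)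
    simp only [hL2, ne_eq, List.map_eq_nil_iff]
    intro h
    rw [h] at this
    simp at this
  cases h1 : PySem.List.max? L1 (fun v => v) with
  | none => exact absurd ((PySem.List.max?_eq_none_iff _ _).mp h1) hL1ne
  | some m1 =>
  cases h2 : PySem.List.max? L2 (fun v => v) with
  | none => exact absurd ((PySem.List.max?_eq_none_iff _ _).mp h2) hL2ne
  | some m2 =>
  simp only [Option.getD_some]
  apply le_antisymm
  · obtain ⟨t, htmem, hft⟩ := List.mem_map.mp (PySem.List.max?_mem h1)
    simp only [List.mem_range] at htmem
    have hle := pv_f_le arr k t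
    have hmem2 : ((rs.count (pvRes k (arr.getD t 0)) : Int)) ∈ L2 := by
      apply List.mem_map_of_mem
      apply (PySem.Set.mem_ofList _ _).mpr
      rw [hrs]
      apply List.mem_map_of_mem
      rw [List.getD_eq_getElem _ 0 htmem]
      exact List.getElem_mem htmem
    have := PySem.List.max?_isMax h2 _ hmem2
    calc m1 = pvF arr k t := hft.symm
      _ ≤ _ := hle
      _ ≤ m2 := this
  · obtain ⟨ρ, hρmem, hcρ⟩ := List.mem_map.mp (PySem.List.max?_mem h2)
    have hρrs : ρ ∈ rs := (PySem.Set.mem_ofList _ _).mp hρmem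
    obtain ⟨t, htl, _, hft⟩ := pv_f_attains arr k ρ hρrs
    have hmem1 : pvF arr k t ∈ L1 :=
      List.mem_map_of_mem (List.mem_range.mpr htl)
    have := PySem.List.max?_isMax h1 _ hmem1
    calc m2 = (rs.count ρ : Int) := hcρ.symm
      _ = pvF arr k t := hft.symm
      _ ≤ m1 := this

theorem pv_final (arr : List Int) (k : Int) (hne : arr ≠ []) (hk : k ≠ 0) :
    max_length_subsequence arr k = max_length_subsequence_alt arr k := by
  have hn1 : 1 ≤ arr.length := List.length_pos_iff.mpr hne
  have hA : max_length_subsequence arr k =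
      (PySem.List.max? ((List.range arr.length).map (pvF arr k)) (fun v => v)).getD 0 := by
    show (PySem.List.max? ((PySem.List.pyRange 1 ((arr.length : Nat) : Int)).foldl (fun dp i =>
      (PySem.List.pyRange 0 i).foldl (fun dp j =>
        if PySem.Int.mod (PySem.List.pyGetD arr i 0 - PySem.List.pyGetD arr j 0) k = 0 then
          dp.set i.toNat (max (PySem.List.pyGetD dp i 0) (PySem.List.pyGetD dp j 0 + 1))
        else dp) dp) (List.replicate arr.length 1)) (fun v => v)).getD 0 = _
    rw [pv_outer arr k hk arr.length hn1 le_rfl, pv_dp_final]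
  have hB : max_length_subsequence_alt arr k =
      (PySem.List.max? ((PySem.Set.ofList (arr.map (pvRes k))).map
        (fun ρ => (((arr.map (pvRes k)).count ρ) : Int))) (fun v => v)).getD 0 := by
    show (PySem.List.max? (PySem.Dict.values (arr.foldl (fun d x =>
      d.insert (PySem.Int.mod x k) (d.getD (PySem.Int.mod x k) 0 + 1))
      (PySem.Dict.empty : PySem.Dict Int Int))) (fun v => v)).getD 0 = _
    have hB1 : arr.foldl (fun d x =>
        d.insert (PySem.Int.mod x k) (d.getD (PySem.Int.mod x k) 0 + 1))
        (PySem.Dict.empty : PySem.Dict Int Int) = PySem.Dict.counter (arr.map (pvRes k)) := by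
      rw [← PySem.Dict.foldl_insert_getD_add_one_eq_counter, List.foldl_map]
      rfl
    rw [hB1]
    simp [PySem.Dict.values, PySem.Dict.items_counter, List.map_map, Function.comp_def]
  rw [hA, hB]
  exact pv_max_eq arr k hne

-- ===== VERDICT (by name: the statement is the Claim_ definition above) =====
theorem max_length_subsequence_spec : Claim_equal_max_length_subsequence := by
  intro arr k _ hpre
  unfold Spec_max_length_subsequence
  exact pv_final arr k hpre.1 hpre.2
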